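-- pv_equiv track=rewrite | github.com/dzamor509/DZ439 | test.py | get_kmers
-- ===== SOURCE A (Python) =====
-- from collections import defaultdict, Counter
--
-- def get_kmers(sequence, k):
--     if len(sequence) < k:
--         return defaultdict(Counter)
--     kmer_dict = defaultdict(Counter)
--     for i in range(len(sequence) - k):
--         kmer = sequence[i:i+k]
--         next_char = sequence[i+k]
--         if set(kmer + next_char).issubset({'A', 'C', 'G', 'T'}):
--             kmer_dict[kmer][next_char] += 1
--     last_kmer = sequence[-k:]
--     if set(last_kmer).issubset({'A', 'C', 'G', 'T'}):
--         if last_kmer not in kmer_dict: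
--             kmer_dict[last_kmer] = Counter()
--     return kmer_dict
-- ===== SOURCE B (Python) =====
-- from collections import defaultdict, Counter
--
-- def get_kmers(sequence, k):
--     result = defaultdict(Counter)
--     if len(sequence) < k:
--         return result
--     # prefix array: run[j] = length of the maximal ACGT-only run ending at position j-1
--     run = [0]
--     for c in sequence:
--         run.append(run[-1] + 1 if c in "ACGT" else 0)
--     # every position j whose preceding k+1 characters are all ACGT yields one event
--     events = [(sequence[j - k:j], sequence[j])
--               for j in range(len(sequence)) if run[j + 1] > k]
--     for kmer, nc in events:
--         result[kmer][nc] += 1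
--     last_kmer = sequence[-k:]
--     if run[-1] >= len(last_kmer):
--         result.setdefault(last_kmer, Counter())
--     return result
-- ===== Notes on version B (the rewrite author's own statement) =====
-- stated objective: faster
-- what changed: Replaces A's per-window slice+set+subset test by a staged pipeline: one pass builds a prefix array of ACGT-run lengths, a comprehension selects the positions the array certifies valid and materialises the (kmer, next_char) events, and a final pass aggregates them; the trailing-kmer check is a single comparison against the run array instead of a set test.
-- outside the precondition, e.g. on get_kmers('A', -1): A returns {'': {'A': 2}}, B returns {'': {'A': 1}}
import Mathlib
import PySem

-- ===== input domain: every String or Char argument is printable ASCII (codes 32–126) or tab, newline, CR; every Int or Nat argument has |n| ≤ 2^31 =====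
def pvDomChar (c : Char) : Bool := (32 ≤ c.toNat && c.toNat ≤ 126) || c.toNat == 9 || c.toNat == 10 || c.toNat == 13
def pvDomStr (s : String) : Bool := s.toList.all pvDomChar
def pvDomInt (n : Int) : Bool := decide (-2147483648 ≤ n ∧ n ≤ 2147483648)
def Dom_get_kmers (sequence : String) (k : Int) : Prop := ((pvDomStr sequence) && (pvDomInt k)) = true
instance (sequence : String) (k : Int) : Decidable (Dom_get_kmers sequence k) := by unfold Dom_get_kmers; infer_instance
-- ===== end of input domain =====

-- B replaces A's per-window set construction + subset test by a staged pipeline: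
-- a prefix array of ACGT-run lengths, an event comprehension it certifies, and an
-- aggregation pass; equivalence is proved for k ≥ 0.

def pvACGT : List Char := ['A', 'C', 'G', 'T']

-- ===== PORT A =====
-- loop body of A: kmer = sequence[i:i+k]; next_char = sequence[i+k]; subset test on set(kmer+next_char)
-- sequence[i+k] is ported with pyGetD: inside Pre_ (k ≥ 0) the index is always in range; Python raises only for k < -len.
def pvStepA (cs : List Char) (k : Int) (d : PySem.Dict String (PySem.Dict String Int)) (i : Int) :
    PySem.Dict String (PySem.Dict String Int) :=
  let kmer := PySem.List.slice cs (some i) (some (i + k))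
  let nc := PySem.List.pyGetD cs (i + k) ' '
  if PySem.Set.issubset (PySem.Set.ofList (kmer ++ [nc])) (PySem.Set.ofList pvACGT) then
    d.modify (String.ofList kmer) PySem.Dict.empty
      (fun ctr => ctr.modify (String.ofList [nc]) 0 (· + 1))
  else d

def get_kmers (sequence : String) (k : Int) : List (String × List (String × Int)) :=
  let cs := sequence.toList
  if (cs.length : Int) < k then []
  else
    let d := (PySem.List.pyRange 0 ((cs.length : Int) - k) 1).foldl (pvStepA cs k) PySem.Dict.empty
    let last_kmer := PySem.List.slice cs (some (-k)) none
    let d := if PySem.Set.issubset (PySem.Set.ofList last_kmer) (PySem.Set.ofList pvACGT) then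
        (if d.contains (String.ofList last_kmer) then d
         else d.insert (String.ofList last_kmer) PySem.Dict.empty)
      else d
    d.items.map (fun p => (p.1, p.2.items))

-- ===== PORT B =====
-- stage 1 body: run.append(run[-1] + 1 if c in "ACGT" else 0)
def pvRunStep (r : List Int) (c : Char) : List Int :=
  r ++ [if pvACGT.contains c then PySem.List.pyGetD r (-1) 0 + 1 else 0]

def get_kmers_alt (sequence : String) (k : Int) : List (String × List (String × Int)) :=
  let cs := sequence.toList
  if (cs.length : Int) < k then []
  else
    -- stage 1: prefix array of ACGT-run lengths
    let run := cs.foldl pvRunStep [0]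
    -- stage 2: events = [(sequence[j-k:j], sequence[j]) for j in range(n) if run[j+1] > k]
    let events := ((PySem.List.pyRange 0 (cs.length : Int) 1).filter
        (fun j => decide (k < PySem.List.pyGetD run (j + 1) 0))).map
      (fun j => (String.ofList (PySem.List.slice cs (some (j - k)) (some j)),
                 String.ofList [PySem.List.pyGetD cs j ' ']))
    -- stage 3: aggregate the events
    let d := events.foldl (fun d e =>
        d.modify e.1 PySem.Dict.empty (fun ctr => ctr.modify e.2 0 (· + 1))) PySem.Dict.empty
    let last_kmer := PySem.List.slice cs (some (-k)) none
    let d := if (last_kmer.length : Int) ≤ PySem.List.pyGetD run (-1) 0 then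
        d.setdefault (String.ofList last_kmer) PySem.Dict.empty
      else d
    d.items.map (fun p => (p.1, p.2.items))

-- ===== PRECONDITION & SPEC =====
-- Pre_ excludes negative k, on which A either raises IndexError (k < -len) or counts windows through
-- accidental negative-index wraparound of sequence[i+k] and empty slices — artefacts of A's implementation.
def Pre_get_kmers (sequence : String) (k : Int) : Prop := 0 ≤ k
instance (sequence : String) (k : Int) : Decidable (Pre_get_kmers sequence k) := by
  unfold Pre_get_kmers; infer_instance

def pvWitness_get_kmers : String × Int := ("ACGAT", 2)

def Spec_get_kmers (sequence : String) (k : Int) (out : List (String × List (String × Int))) : Prop :=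
  out = get_kmers_alt sequence k
instance (sequence : String) (k : Int) (out : List (String × List (String × Int))) :
    Decidable (Spec_get_kmers sequence k out) := by unfold Spec_get_kmers; infer_instance

-- ===== CLAIM (what is proved, stated in full; the proofs are below) =====
def Claim_equal_get_kmers : Prop := ∀ (sequence : String) (k : Int),
  Dom_get_kmers sequence k → Pre_get_kmers sequence k →
  Spec_get_kmers sequence k (get_kmers sequence k)

-- ===== LEMMAS AND PROOFS =====

-- length of the all-ACGT run of cs ending just before position m (the m-th entry of B's run array)
def runUpTo (cs : List Char) : Nat → Nat
  | 0 => 0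
  | m + 1 => if pvACGT.contains (cs.getD m ' ') then runUpTo cs m + 1 else 0

-- the bump `kmer_dict[kmer][next_char] += 1`, as a function of the (kmer, next_char) pair
def pvBumpP (d : PySem.Dict String (PySem.Dict String Int)) (e : String × String) :
    PySem.Dict String (PySem.Dict String Int) :=
  d.modify e.1 PySem.Dict.empty (fun ctr => ctr.modify e.2 0 (· + 1))

-- validity of the (k+1)-character window starting at i, in drop/take form
def pvWinOK (cs : List Char) (K i : Nat) : Bool :=
  ((cs.drop i).take (K + 1)).all (fun c => pvACGT.contains c)

lemma issubset_ofList_all (l t : List Char) :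
    PySem.Set.issubset (PySem.Set.ofList l) t = l.all (fun c => t.contains c) := by
  simp only [PySem.Set.issubset, PySem.Set.contains_eq_listContains, List.contains_eq_mem]
  rw [Bool.eq_iff_iff]
  simp only [List.all_eq_true, PySem.Set.mem_ofList]

lemma runUpTo_ge_iff (cs : List Char) : ∀ (m : Nat), m ≤ cs.length → ∀ (t : Nat),
    (t ≤ runUpTo cs m ↔
      t ≤ m ∧ ((cs.drop (m - t)).take t).all (fun c => pvACGT.contains c) = true) := by
  intro m
  induction m with
  | zero =>
    intro _ t
    cases t with
    | zero => simp [runUpTo]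
    | succ s => simp [runUpTo]
  | succ m ih =>
    intro hm t
    have hm' : m ≤ cs.length := by omega
    have hlt : m < cs.length := by omega
    have hgetD : cs.getD m ' ' = cs[m] := by
      simp [List.getD_eq_getElem?_getD, List.getElem?_eq_getElem hlt]
    cases t with
    | zero => simp [runUpTo]
    | succ s =>
      have hwin : s ≤ m → (cs.drop (m - s)).take (s + 1)
          = (cs.drop (m - s)).take s ++ [cs[m]] := by
        intro hs
        rw [List.take_add_one]
        congr 1
        rw [List.getElem?_drop]
        have : m - s + s = m := by omega
        rw [this, List.getElem?_eq_getElem hlt]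
        rfl
      unfold runUpTo
      by_cases hc : pvACGT.contains (cs.getD m ' ') = true
      · rw [if_pos hc]
        have hsub : m + 1 - (s + 1) = m - s := by omega
        rw [hsub]
        constructor
        · intro h
          have hs : s ≤ runUpTo cs m := by omega
          obtain ⟨hsm, hall⟩ := (ih hm' s).mp hs
          refine ⟨by omega, ?_⟩
          rw [hwin hsm, List.all_append]
          simp only [Bool.and_eq_true]
          exact ⟨hall, by rw [hgetD] at hc; simpa using hc⟩
        · rintro ⟨hsm1, hall⟩
          have hsm : s ≤ m := by omega
          rw [hwin hsm, List.all_append] at hall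
          simp only [Bool.and_eq_true] at hall
          have := (ih hm' s).mpr ⟨hsm, hall.1⟩
          omega
      · rw [if_neg hc]
        constructor
        · intro h; omega
        · rintro ⟨hsm1, hall⟩
          have hsm : s ≤ m := by omega
          have hsub : m + 1 - (s + 1) = m - s := by omega
          rw [hsub, hwin hsm, List.all_append] at hall
          simp only [Bool.and_eq_true] at hall
          have : pvACGT.contains cs[m] = true := by
            simpa using hall.2
          rw [hgetD] at hc; exact absurd this hc

lemma runUpTo_le (cs : List Char) : ∀ m, runUpTo cs m ≤ m := by
  intro m
  induction m with
  | zero => simp [runUpTo]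
  | succ m ih => unfold runUpTo; split <;> omega

lemma win_succ (cs : List Char) (m s : Nat) (hlt : m < cs.length) (hs : s ≤ m) :
    (cs.drop (m - s)).take (s + 1) = (cs.drop (m - s)).take s ++ [cs[m]] := by
  rw [List.take_add_one]
  congr 1
  rw [List.getElem?_drop]
  have : m - s + s = m := by omega
  rw [this, List.getElem?_eq_getElem hlt]
  rfl

-- stage 1 computes the prefix array of runUpTo values
lemma run_fold (cs : List Char) : ∀ (m : Nat), m ≤ cs.length →
    (cs.take m).foldl pvRunStep [0]
      = (List.range (m + 1)).map (fun t => ((runUpTo cs t : Nat) : Int)) := by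
  intro m
  induction m with
  | zero => simp [runUpTo]
  | succ m ih =>
    intro hm
    have hm' : m ≤ cs.length := by omega
    have hlt : m < cs.length := by omega
    have htake : cs.take (m + 1) = cs.take m ++ [cs[m]] := by
      rw [List.take_add_one, List.getElem?_eq_getElem hlt]; rfl
    rw [htake, List.foldl_append, ih hm']
    simp only [List.foldl_cons, List.foldl_nil]
    unfold pvRunStep
    have hsplit : (List.range (m + 1)).map (fun t => ((runUpTo cs t : Nat) : Int))
        = (List.range m).map (fun t => ((runUpTo cs t : Nat) : Int))
          ++ [((runUpTo cs m : Nat) : Int)] := by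
      rw [List.range_succ, List.map_append]; rfl
    have hsplit2 : (List.range (m + 1 + 1)).map (fun t => ((runUpTo cs t : Nat) : Int))
        = (List.range (m + 1)).map (fun t => ((runUpTo cs t : Nat) : Int))
          ++ [((runUpTo cs (m + 1) : Nat) : Int)] := by
      rw [List.range_succ, List.map_append]; rfl
    rw [hsplit2]
    congr 1
    rw [hsplit, PySem.List.pyGetD_neg_one_append_singleton]
    congr 1
    have hgetD : cs.getD m ' ' = cs[m] := by
      simp [List.getD_eq_getElem?_getD, List.getElem?_eq_getElem hlt]
    have h1 : runUpTo cs (m + 1) = if pvACGT.contains (cs.getD m ' ') then runUpTo cs m + 1 else 0 := rfl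
    rw [h1, hgetD]
    split <;> simp

-- a fold with a data-independent condition is a fold over the filtered, mapped event list
lemma foldl_if_eq_filter_map {α β γ : Type} (p : α → Bool) (g : α → β) (f : γ → β → γ) :
    ∀ (l : List α) (d : γ),
      l.foldl (fun d i => if p i then f d (g i) else d) d = ((l.filter p).map g).foldl f d := by
  intro l
  induction l with
  | nil => intro d; rfl
  | cons a l ih =>
    intro d
    by_cases h : p a = true <;> simp [h, ih]

lemma getD_run_array (cs : List Char) (m : Nat) :
    ((List.range (cs.length + 1)).map (fun t => ((runUpTo cs t : Nat) : Int))).getD m 0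
      = if m < cs.length + 1 then ((runUpTo cs m : Nat) : Int) else 0 := by
  by_cases h : m < cs.length + 1
  · rw [List.getD_eq_getElem?_getD, List.getElem?_map,
      List.getElem?_eq_getElem (by simpa using h)]
    simp [h, List.getElem_range]
  · rw [List.getD_eq_getElem?_getD, List.getElem?_map,
      List.getElem?_eq_none (by simp; omega)]
    simp [h]

-- the index-shift between B's event positions j and A's window starts i = j - K
lemma shift (cs : List Char) (K : Nat) : ∀ (N : Nat), N ≤ cs.length →
    (List.range N).filter (fun j => decide (K + 1 ≤ runUpTo cs (j + 1)))
      = ((List.range (N - K)).filter (fun i => pvWinOK cs K i)).map (fun i => i + K) := by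
  intro N
  induction N with
  | zero => simp
  | succ N ih =>
    intro hN
    have hN' : N ≤ cs.length := by omega
    rw [List.range_succ, List.filter_append, ih hN']
    by_cases hK : K ≤ N
    · have hNK : N + 1 - K = (N - K) + 1 := by omega
      rw [hNK, List.range_succ, List.filter_append, List.map_append]
      congr 1
      have hiff := runUpTo_ge_iff cs (N + 1) hN (K + 1)
      have hsub : N + 1 - (K + 1) = N - K := by omega
      rw [hsub] at hiff
      have hcond : (decide (K + 1 ≤ runUpTo cs (N + 1)) = pvWinOK cs K (N - K)) := by
        unfold pvWinOK
        rw [Bool.eq_iff_iff, decide_eq_true_iff, hiff]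
        constructor
        · exact fun h => h.2
        · exact fun h => ⟨by omega, h⟩
      simp only [List.filter_cons, List.filter_nil, hcond]
      have hplus : N - K + K = N := by omega
      split <;> simp [hplus]
    · have h1 : N + 1 - K = 0 := by omega
      have h2 : N - K = 0 := by omega
      have hfalse : decide (K + 1 ≤ runUpTo cs (N + 1)) = false := by
        have := runUpTo_le cs (N + 1)
        simp only [decide_eq_false_iff_not]
        omega
      simp [h1, h2, List.filter_cons]
      have := runUpTo_le cs (N + 1)
      omega

-- one A step at an in-range window start, in event form
lemma stepA_eq (cs : List Char) (K i : Nat) (hi : i + K < cs.length)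
    (d : PySem.Dict String (PySem.Dict String Int)) :
    pvStepA cs (K : Int) d ((i : Nat) : Int)
      = if pvWinOK cs K i then
          pvBumpP d (String.ofList ((cs.drop i).take K), String.ofList [cs.getD (i + K) ' '])
        else d := by
  have hcast : ((i : Nat) : Int) + (K : Int) = ((i + K : Nat) : Int) := by push_cast; ring
  have hget : cs.getD (i + K) ' ' = cs[i + K] := by
    simp [List.getD_eq_getElem?_getD, List.getElem?_eq_getElem hi]
  have hofl : PySem.Set.ofList pvACGT = pvACGT := by decide
  have hwin : (cs.drop i).take (K + 1) = (cs.drop i).take K ++ [cs[i + K]] := by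
    have := win_succ cs (i + K) K hi (by omega)
    simpa using this
  unfold pvStepA pvBumpP pvWinOK
  simp only [hcast, PySem.List.pyGetD_natCast, PySem.List.slice_natCast,
    Nat.add_sub_cancel_left, issubset_ofList_all, hofl, hwin, hget, List.all_append]

-- A's conditional fold over window starts = fold of pvBumpP over its valid-window event list
lemma sideA (cs : List Char) (K : Nat) (hK : K ≤ cs.length)
    (d : PySem.Dict String (PySem.Dict String Int)) :
    (PySem.List.pyRange 0 ((cs.length : Int) - (K : Int)) 1).foldl (pvStepA cs (K : Int)) d
      = (((List.range (cs.length - K)).filter (fun i => pvWinOK cs K i)).map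
          (fun i => (String.ofList ((cs.drop i).take K),
                     String.ofList [cs.getD (i + K) ' ']))).foldl pvBumpP d := by
  have hsub : (cs.length : Int) - (K : Int) = ((cs.length - K : Nat) : Int) := by omega
  rw [hsub, PySem.List.pyRange_zero_natCast, List.foldl_map]
  rw [PySem.List.foldl_congr_mem (List.range (cs.length - K)) _
      (fun d i => if pvWinOK cs K i then
          pvBumpP d (String.ofList ((cs.drop i).take K), String.ofList [cs.getD (i + K) ' '])
        else d) d
      (fun acc x hx => stepA_eq cs K x (by rw [List.mem_range] at hx; omega) acc)]
  exact foldl_if_eq_filter_map _ _ _ _ d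

-- the two trailing-kmer conditions agree (for 0 ≤ k = K ≤ len)
lemma last_cond (cs : List Char) (K : Nat) (hK : K ≤ cs.length) :
    PySem.Set.issubset (PySem.Set.ofList (PySem.List.slice cs (some (-(K : Int))) none))
        (PySem.Set.ofList pvACGT)
      = decide ((((PySem.List.slice cs (some (-(K : Int))) none).length : Nat) : Int)
          ≤ ((runUpTo cs cs.length : Nat) : Int)) := by
  have hofl : PySem.Set.ofList pvACGT = pvACGT := by decide
  rw [issubset_ofList_all, hofl]
  rcases Nat.eq_zero_or_pos K with hK0 | hKpos
  · subst hK0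
    have h0 : (-((0 : Nat) : Int)) = (((0 : Nat) : Int)) := by norm_num
    rw [h0, PySem.List.slice_from_natCast, List.drop_zero]
    have hiff := runUpTo_ge_iff cs cs.length le_rfl cs.length
    simp only [Nat.sub_self, List.drop_zero, List.take_length] at hiff
    rw [Bool.eq_iff_iff, decide_eq_true_iff]
    constructor
    · intro h
      have := hiff.mpr ⟨le_rfl, h⟩
      omega
    · intro h
      exact (hiff.mp (by omega)).2
  · rw [PySem.List.slice_from_neg_natCast cs K hKpos]
    have hlen : (cs.drop (cs.length - K)).length = K := by
      rw [List.length_drop]; omega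
    rw [hlen]
    have hiff := runUpTo_ge_iff cs cs.length le_rfl K
    have htk : (cs.drop (cs.length - K)).take K = cs.drop (cs.length - K) := by
      rw [List.take_of_length_le (by rw [hlen])]
    rw [htk] at hiff
    rw [Bool.eq_iff_iff, decide_eq_true_iff]
    constructor
    · intro h
      have := hiff.mpr ⟨hK, h⟩
      omega
    · intro h
      exact (hiff.mp (by omega)).2

-- ===== VERDICT (by name: the statement is the Claim_ definition above) =====
theorem get_kmers_spec : Claim_equal_get_kmers := by
  intro seq k _ hpre
  unfold Spec_get_kmers
  simp only [get_kmers, get_kmers_alt]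
  by_cases hlt : ((seq.toList.length : Int) < k)
  · rw [if_pos hlt, if_pos hlt]
  · rw [if_neg hlt, if_neg hlt]
    obtain ⟨K, rfl⟩ : ∃ K : Nat, k = (K : Int) := ⟨k.toNat, (Int.toNat_of_nonneg hpre).symm⟩
    set cs := seq.toList with hcs
    have hK : K ≤ cs.length := by exact_mod_cast not_lt.mp hlt
    -- stage 1: the run array
    have hrun : cs.foldl pvRunStep [0]
        = (List.range (cs.length + 1)).map (fun t => ((runUpTo cs t : Nat) : Int)) := by
      have := run_fold cs cs.length le_rfl
      rwa [List.take_length] at this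
    rw [hrun]
    -- stage 2: the event list equals A's valid-window event list
    have hevents :
        ((PySem.List.pyRange 0 (cs.length : Int) 1).filter
            (fun j => decide ((K : Int) < PySem.List.pyGetD
              ((List.range (cs.length + 1)).map (fun t => ((runUpTo cs t : Nat) : Int))) (j + 1) 0))).map
          (fun j => (String.ofList (PySem.List.slice cs (some (j - (K : Int))) (some j)),
                     String.ofList [PySem.List.pyGetD cs j ' ']))
        = ((List.range (cs.length - K)).filter (fun i => pvWinOK cs K i)).map
            (fun i => (String.ofList ((cs.drop i).take K),
                       String.ofList [cs.getD (i + K) ' '])) := by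
      rw [PySem.List.pyRange_zero_natCast, List.filter_map]
      have hcond : (List.range cs.length).filter
          ((fun j => decide ((K : Int) < PySem.List.pyGetD
              ((List.range (cs.length + 1)).map (fun t => ((runUpTo cs t : Nat) : Int))) (j + 1) 0))
            ∘ (fun j : Nat => (j : Int)))
          = (List.range cs.length).filter (fun j => decide (K + 1 ≤ runUpTo cs (j + 1))) := by
        apply List.filter_congr
        intro j hj
        rw [List.mem_range] at hj
        simp only [Function.comp]
        have h1 : ((j : Nat) : Int) + 1 = ((j + 1 : Nat) : Int) := by push_cast; ring
        rw [h1, PySem.List.pyGetD_natCast, getD_run_array, if_pos (by omega)]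
        rw [decide_eq_decide]
        omega
      rw [hcond, shift cs K cs.length le_rfl, List.map_map, List.map_map]
      apply List.map_congr_left
      intro i _
      simp only [Function.comp]
      have h1 : ((i + K : Nat) : Int) - (K : Int) = ((i : Nat) : Int) := by push_cast; ring
      have h2 : ((i + K : Nat) : Int) = ((i : Nat) : Int) + (K : Int) := by push_cast; ring
      rw [h1, h2, PySem.List.slice_natCast_add, ← h2, PySem.List.pyGetD_natCast]
    rw [hevents]
    -- stage 3: the aggregation fold is A's conditional fold
    rw [show (fun (d : PySem.Dict String (PySem.Dict String Int)) (e : String × String) =>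
        d.modify e.1 PySem.Dict.empty (fun ctr => ctr.modify e.2 0 (· + 1))) = pvBumpP from rfl]
    rw [← sideA cs K hK PySem.Dict.empty]
    -- trailing kmer: the two conditions agree, and setdefault = the contains/insert branch
    have hlastlen : PySem.List.pyGetD
        ((List.range (cs.length + 1)).map (fun t => ((runUpTo cs t : Nat) : Int))) (-1) 0
        = ((runUpTo cs cs.length : Nat) : Int) := by
      rw [List.range_succ, List.map_append]
      simpa using PySem.List.pyGetD_neg_one_append_singleton
        (xs := (List.range cs.length).map (fun t => ((runUpTo cs t : Nat) : Int)))
        (x := ((runUpTo cs cs.length : Nat) : Int)) (d := 0)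
    rw [hlastlen]
    have hcond := last_cond cs K hK
    set d0 := (PySem.List.pyRange 0 ((cs.length : Int) - (K : Int)) 1).foldl
      (pvStepA cs (K : Int)) PySem.Dict.empty with hd0
    set lk := PySem.List.slice cs (some (-(K : Int))) none with hlk
    by_cases hc : PySem.Set.issubset (PySem.Set.ofList lk) (PySem.Set.ofList pvACGT) = true
    · rw [if_pos hc]
      rw [hc] at hcond
      rw [if_pos (of_decide_eq_true hcond.symm)]
      by_cases hmem : d0.contains (String.ofList lk) = true
      · rw [if_pos hmem, PySem.Dict.setdefault_of_contains _ _ hmem]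
      · rw [if_neg hmem,
          PySem.Dict.setdefault_of_not_contains _ _ (by simpa using hmem)]
    · rw [if_neg hc]
      rw [eq_comm, Bool.eq_iff_iff] at hcond
      rw [if_neg (by
        intro h
        exact hc (hcond.mp (decide_eq_true h)))]
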